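-- pv_equiv track=rewrite | github.com/surpmh/algorithms | Programmers/level2/42842.py | solution
-- ===== SOURCE A (Python) =====
-- def solution(brown, yellow):
--     l = (brown - 4) // 2
--     h = 0
--     w = 0
--
--     for i in range(1, l):
--         if i * (l - i) == yellow:
--             h = i
--             w = l -i
--             break
--
--     answer = [w+2, h+2]
--
--     return answer
-- ===== SOURCE B (Python) =====
-- def _isqrt(n):
--     # binary search for floor(sqrt(n)), n >= 0
--     lo, hi = 0, n + 1
--     while hi - lo > 1:
--         mid = (lo + hi) // 2
--         if mid * mid <= n:
--             lo = mid
--         else: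
--             hi = mid
--     return lo
--
--
-- def solution(brown, yellow):
--     l = (brown - 4) // 2
--     if yellow > 0 and l >= 2:
--         d = l * l - 4 * yellow
--         if d >= 0:
--             s = _isqrt(d)
--             if s * s == d and (l - s) % 2 == 0:
--                 h = (l - s) // 2
--                 if h >= 1:
--                     return [l - h + 2, h + 2]
--     return [2, 2]
-- ===== Notes on version B (the rewrite author's own statement) =====
-- stated objective: faster
-- what changed: B replaces A's linear scan over all candidate heights by solving the quadratic x^2 - l*x + yellow = 0 in closed form, using a binary-search integer square root on the discriminant.
import Mathlib
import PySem

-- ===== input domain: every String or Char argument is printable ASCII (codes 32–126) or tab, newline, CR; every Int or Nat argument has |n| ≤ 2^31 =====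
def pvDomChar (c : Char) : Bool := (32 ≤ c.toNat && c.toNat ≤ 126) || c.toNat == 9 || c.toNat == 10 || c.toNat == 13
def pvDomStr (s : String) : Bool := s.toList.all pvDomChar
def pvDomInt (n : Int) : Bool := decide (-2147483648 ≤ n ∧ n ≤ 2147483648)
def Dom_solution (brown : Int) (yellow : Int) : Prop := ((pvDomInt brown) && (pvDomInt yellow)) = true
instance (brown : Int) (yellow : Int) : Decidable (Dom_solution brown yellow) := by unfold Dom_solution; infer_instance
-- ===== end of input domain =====

-- B solves the quadratic for the height in closed form (integer sqrt of the discriminant by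
-- binary search) instead of A's linear scan; objective: faster.

-- ===== PORT A =====
-- the for-loop with break: returns the (h, w) state after the loop
def solutionLoopA (l : Int) (yellow : Int) : List Int → Int × Int
  | [] => (0, 0)
  | i :: rest => if i * (l - i) = yellow then (i, l - i) else solutionLoopA l yellow rest

def solution (brown : Int) (yellow : Int) : List Int :=
  let l := PySem.Int.floordiv (brown - 4) 2
  let hw := solutionLoopA l yellow (PySem.List.pyRange 1 l 1)
  [hw.2 + 2, hw.1 + 2]

-- ===== PORT B =====
-- binary-search floor integer square root, exactly Source B's _isqrt
def isqrtAux (n lo hi : Int) : Int :=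
  if _h : hi - lo > 1 then
    let mid := PySem.Int.floordiv (lo + hi) 2
    if mid * mid ≤ n then isqrtAux n mid hi else isqrtAux n lo mid
  else lo
termination_by (hi - lo).toNat
decreasing_by
  · have hm : PySem.Int.floordiv (lo + hi) 2 = (lo + hi) / 2 :=
      PySem.Int.floordiv_eq_ediv_of_pos (by norm_num)
    simp only [hm]; omega
  · have hm : PySem.Int.floordiv (lo + hi) 2 = (lo + hi) / 2 :=
      PySem.Int.floordiv_eq_ediv_of_pos (by norm_num)
    simp only [hm]; omega

def solution_alt (brown : Int) (yellow : Int) : List Int :=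
  let l := PySem.Int.floordiv (brown - 4) 2
  if yellow > 0 ∧ l ≥ 2 then
    let d := l * l - 4 * yellow
    if d ≥ 0 then
      let s := isqrtAux d 0 (d + 1)
      if s * s = d ∧ PySem.Int.mod (l - s) 2 = 0 then
        let h := PySem.Int.floordiv (l - s) 2
        if h ≥ 1 then [l - h + 2, h + 2] else [2, 2]
      else [2, 2]
    else [2, 2]
  else [2, 2]

-- ===== PRECONDITION & SPEC =====
def Spec_solution (brown : Int) (yellow : Int) (out : List Int) : Prop := out = solution_alt brown yellow
instance (brown : Int) (yellow : Int) (out : List Int) : Decidable (Spec_solution brown yellow out) := by unfold Spec_solution; infer_instance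

-- ===== CLAIM (what is proved, stated in full; the proofs are below) =====
def Claim_equal_solution : Prop := ∀ (brown : Int) (yellow : Int), Dom_solution brown yellow → Spec_solution brown yellow (solution brown yellow)

-- ===== LEMMAS AND PROOFS =====

theorem isqrtAux_spec (n : Int) : ∀ (k : Nat) (lo hi : Int), (hi - lo).toNat = k →
    0 ≤ lo → lo * lo ≤ n → n < hi * hi → lo < hi →
    0 ≤ isqrtAux n lo hi ∧ isqrtAux n lo hi * isqrtAux n lo hi ≤ n ∧
      n < (isqrtAux n lo hi + 1) * (isqrtAux n lo hi + 1) := by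
  intro k
  induction k using Nat.strong_induction_on with
  | _ k ih =>
    intro lo hi hk hlo h1 h2 h3
    rw [isqrtAux]
    have hm : PySem.Int.floordiv (lo + hi) 2 = (lo + hi) / 2 :=
      PySem.Int.floordiv_eq_ediv_of_pos (by norm_num)
    by_cases hgt : hi - lo > 1
    · simp only [hgt, dif_pos, hm]
      set mid := (lo + hi) / 2 with hmid
      have hmb : lo < mid ∧ mid < hi := by constructor <;> omega
      by_cases hle : mid * mid ≤ n
      · simp only [hle, if_pos]
        exact ih (hi - mid).toNat (by omega) mid hi rfl (by omega) hle h2 hmb.2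
      · simp only [hle, if_neg, not_false_iff]
        exact ih (mid - lo).toNat (by omega) lo mid rfl hlo h1 (by omega) hmb.1
    · simp only [hgt, dif_neg, not_false_iff]
      have : hi = lo + 1 := by omega
      exact ⟨hlo, h1, by rw [← this]; exact h2⟩

theorem isqrt_of_sq (d s : Int) (hs : 0 ≤ s) (hd : s * s = d) : isqrtAux d 0 (d + 1) = s := by
  have hd0 : 0 ≤ d := hd ▸ mul_nonneg hs hs
  have hspec := isqrtAux_spec d (d + 1 - 0).toNat 0 (d + 1) rfl le_rfl
    (by simpa using hd0) (by nlinarith) (by omega)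
  obtain ⟨hr0, hr1, hr2⟩ := hspec
  set r := isqrtAux d 0 (d + 1)
  by_contra hne
  rcases lt_or_gt_of_ne hne with h | h
  · nlinarith
  · nlinarith

-- A's loop over range(a, l) finds the first match; when h is the least match it returns (h, l-h)
theorem loopA_finds (l yellow h : Int) (hm : h * (l - h) = yellow) (hl : h < l) :
    ∀ (k : Nat) (a : Int), (h - a).toNat = k → a ≤ h →
    (∀ j, a ≤ j → j < h → j * (l - j) ≠ yellow) →
    solutionLoopA l yellow (PySem.List.pyRange a l 1) = (h, l - h) := by
  intro k
  induction k with
  | zero =>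
    intro a hk hah _
    have : a = h := by omega
    subst this
    rw [PySem.List.pyRange_one_cons hl]
    simp [solutionLoopA, hm]
  | succ n ihn =>
    intro a hk hah hmin
    have hlt : a < h := by omega
    rw [PySem.List.pyRange_one_cons (by omega)]
    have hne : a * (l - a) ≠ yellow := hmin a le_rfl hlt
    simp only [solutionLoopA, hne, if_neg, not_false_iff]
    exact ihn (a + 1) (by omega) (by omega) (fun j hj1 hj2 => hmin j (by omega) hj2)

theorem loopA_none (l yellow : Int) :
    ∀ xs : List Int, (∀ i ∈ xs, i * (l - i) ≠ yellow) →
    solutionLoopA l yellow xs = (0, 0) := by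
  intro xs
  induction xs with
  | nil => intro _; rfl
  | cons i rest ih =>
    intro hall
    have : i * (l - i) ≠ yellow := hall i (by simp)
    simp only [solutionLoopA, this, if_neg, not_false_iff]
    exact ih (fun j hj => hall j (by simp [hj]))

theorem solution_eq_alt (brown yellow : Int) : solution brown yellow = solution_alt brown yellow := by
  unfold solution solution_alt
  set l := PySem.Int.floordiv (brown - 4) 2 with hl
  simp only []
  by_cases hex : ∃ i, 1 ≤ i ∧ i < l ∧ i * (l - i) = yellow
  · obtain ⟨i, hi1, hi2, him⟩ := hex
    -- h = min i (l - i) is the least match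
    set h := min i (l - i) with hh
    have hh1 : 1 ≤ h := by omega
    have hhl : h < l := by omega
    have hhm : h * (l - h) = yellow := by
      rcases min_choice i (l - i) with hc | hc <;> rw [hh, hc] <;> nlinarith [him]
    have hmin : ∀ j, 1 ≤ j → j < h → j * (l - j) ≠ yellow := by
      intro j hj1 hj2 hjm
      have hfac : (j - i) * (j - (l - i)) = 0 := by nlinarith [him, hjm]
      rcases mul_eq_zero.mp hfac with hz | hz <;> omega
    have hA : solutionLoopA l yellow (PySem.List.pyRange 1 l 1) = (h, l - h) :=
      loopA_finds l yellow h hhm hhl (h - 1).toNat 1 rfl hh1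
        (fun j hj1 hj2 => hmin j hj1 hj2)
    rw [hA]
    -- B side conditions
    have hy : yellow > 0 := by nlinarith [hhm]
    have hl2 : l ≥ 2 := by omega
    have hs0 : (0:Int) ≤ l - 2 * h := by omega
    have hsd : (l - 2 * h) * (l - 2 * h) = l * l - 4 * yellow := by nlinarith [hhm]
    have hd0 : l * l - 4 * yellow ≥ 0 := by nlinarith [hsd]
    have hsq : isqrtAux (l * l - 4 * yellow) 0 (l * l - 4 * yellow + 1) = l - 2 * h :=
      isqrt_of_sq _ _ hs0 hsd
    rw [if_pos ⟨hy, hl2⟩, if_pos hd0, hsq]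
    have hmod : PySem.Int.mod (l - (l - 2 * h)) 2 = 0 := by
      rw [PySem.Int.mod_eq_emod_of_pos (by norm_num)]
      omega
    rw [if_pos ⟨hsd, hmod⟩]
    have hfd : PySem.Int.floordiv (l - (l - 2 * h)) 2 = h := by
      rw [PySem.Int.floordiv_eq_ediv_of_pos (by norm_num)]
      omega
    rw [hfd, if_pos hh1]
  · push Not at hex
    have hA : solutionLoopA l yellow (PySem.List.pyRange 1 l 1) = (0, 0) := by
      apply loopA_none
      intro j hj
      rw [PySem.List.mem_pyRange_one] at hj
      exact hex j hj.1 hj.2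
    rw [hA]
    -- every branch of B yields [2,2]
    split_ifs with c1 c2 c3 c4
    · -- all conditions hold: derive a match, contradiction
      exfalso
      obtain ⟨hy, hl2⟩ := c1
      obtain ⟨hsd, hmod⟩ := c3
      set s := isqrtAux (l * l - 4 * yellow) 0 (l * l - 4 * yellow + 1) with hs
      have hspec := isqrtAux_spec (l * l - 4 * yellow) (l * l - 4 * yellow + 1 - 0).toNat
        0 (l * l - 4 * yellow + 1) rfl le_rfl (by simpa using c2) (by nlinarith) (by omega)
      have hs0 : 0 ≤ s := hspec.1
      rw [PySem.Int.mod_eq_emod_of_pos (by norm_num)] at hmod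
      rw [PySem.Int.floordiv_eq_ediv_of_pos (by norm_num)] at c4
      set h := (l - s) / 2 with hh
      have hls : l - s = 2 * h := by omega
      have hmatch : h * (l - h) = yellow := by nlinarith [hsd, hls]
      have hhl : h < l := by nlinarith [hs0, hls, c4]
      exact hex h c4 hhl hmatch
    · rfl
    · rfl
    · rfl
    · rfl

-- ===== VERDICT (by name: the statement is the Claim_ definition above) =====
theorem solution_spec : Claim_equal_solution := by
  intro brown yellow _
  unfold Spec_solution
  exact solution_eq_alt brown yellow
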